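-- pv_equiv track=rewrite | github.com/edrmonteiro/PythonPractice | Codility/Stacks and Queues/stoneWall.py | solution
-- ===== SOURCE A (Python) =====
-- def solution(H):
--     rectangles = 1
--     stackRising = []
--     stackRising.append(H[0])
--     for height in H:
--         while len(stackRising) > 0 and stackRising[-1] > height:
--             stackRising.pop()
--         if len(stackRising) == 0 or stackRising[-1] != height:
--             stackRising.append(height)
--             rectangles += 1
--     return rectangles
-- ===== SOURCE B (Python) =====
-- def solution(H):
--     # Count positions i whose height starts a new rectangle: no earlier equal
--     # height is reachable without crossing a strictly lower one.
--     count = 0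
--     for i in range(len(H)):
--         h = H[i]
--         new = True
--         for j in range(i - 1, -1, -1):
--             if H[j] == h:
--                 new = False
--                 break
--             if H[j] < h:
--                 break
--         if new:
--             count += 1
--     return count
-- ===== Notes on version B (the rewrite author's own statement) =====
-- stated objective: simpler
-- what changed: Replaced the rising-stack single pass by a direct stack-free definition: a position starts a new rectangle iff scanning backwards no equal height is found before a strictly lower one; count those positions with two plain loops.
import Mathlib
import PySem

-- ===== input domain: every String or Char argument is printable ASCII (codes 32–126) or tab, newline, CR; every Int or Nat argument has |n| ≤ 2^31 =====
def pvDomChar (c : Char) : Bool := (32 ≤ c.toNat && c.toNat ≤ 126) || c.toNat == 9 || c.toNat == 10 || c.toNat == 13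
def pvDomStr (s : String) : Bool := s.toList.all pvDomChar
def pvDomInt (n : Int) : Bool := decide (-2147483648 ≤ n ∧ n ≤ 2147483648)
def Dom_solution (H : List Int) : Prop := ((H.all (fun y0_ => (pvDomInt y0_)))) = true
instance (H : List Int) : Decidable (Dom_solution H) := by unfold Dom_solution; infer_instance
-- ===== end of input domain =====

-- B replaces A's rising-stack pass by a stack-free count of the positions that
-- start a new rectangle (no earlier equal height before a strictly lower one);
-- simpler, no stack state. On [] A raises IndexError, B returns 0 (outside Pre_).

-- ===== PORT A =====
-- the while-pop loop: pop while the stack top is > height (top kept at the head)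
def popA (height : Int) : List Int → List Int
  | [] => []
  | t :: rest => if t > height then popA height rest else t :: rest

-- one iteration of A's for-loop over state (rectangles, stackRising)
def stepA (st : Int × List Int) (height : Int) : Int × List Int :=
  let s := popA height st.2
  if s = [] ∨ s.head? ≠ some height then (st.1 + 1, height :: s) else (st.1, s)

def solution (H : List Int) : Int :=
  match H with
  | [] => 0  -- Python raises IndexError at H[0]; excluded by Pre_solution
  | h0 :: _ => (H.foldl stepA (1, [h0])).1

-- ===== PORT B =====
-- B's inner loop: scan the already-seen heights backwards (rev = reversed prefix)
def scanBack (h : Int) : List Int → Bool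
  | [] => true
  | x :: rest => if x = h then false else if x < h then true else scanBack h rest

-- B's outer loop: rev is the reversed prefix of processed heights, c the count
def bGo : List Int → List Int → Int → Int
  | _, [], c => c
  | rev, h :: t, c => bGo (h :: rev) t (if scanBack h rev then c + 1 else c)

def solution_alt (H : List Int) : Int := bGo [] H 0

-- ===== PRECONDITION & SPEC =====
-- Pre_ excludes only the empty list, on which A raises IndexError (H[0]).
def Pre_solution (H : List Int) : Prop := H ≠ []
instance (H : List Int) : Decidable (Pre_solution H) := by unfold Pre_solution; infer_instance
def pvWitness_solution : List Int := ([8, 8, 5, 7, 9, 8, 7, 4, 8])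

def Spec_solution (H : List Int) (out : Int) : Prop := out = solution_alt H
instance (H : List Int) (out : Int) : Decidable (Spec_solution H out) := by unfold Spec_solution; infer_instance

-- ===== CLAIM (what is proved, stated in full; the proofs are below) =====
def Claim_equal_solution : Prop := ∀ (H : List Int), Dom_solution H → Pre_solution H → Spec_solution H (solution H)

-- ===== LEMMAS AND PROOFS =====

-- T r: the rising stack (top at head) after processing the reversed prefix r
def T : List Int → List Int
  | [] => []
  | x :: r => x :: (T r).dropWhile (fun y => decide (x ≤ y))

theorem popA_eq_dropWhile (h : Int) (s : List Int) :
    popA h s = s.dropWhile (fun x => decide (h < x)) := by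
  induction s with
  | nil => rfl
  | cons a s ih =>
    simp only [popA, List.dropWhile_cons]
    by_cases hc : h < a <;> simp [hc, ih]

theorem dropWhile_dropWhile (p q : Int → Bool) (l : List Int)
    (hpq : ∀ a, q a = true → p a = true) :
    List.dropWhile p (List.dropWhile q l) = List.dropWhile p l := by
  induction l with
  | nil => rfl
  | cons a l ih =>
    by_cases hq : q a = true
    · rw [List.dropWhile_cons_of_pos hq, List.dropWhile_cons_of_pos (hpq a hq), ih]
    · rw [List.dropWhile_cons_of_neg hq]

theorem isChain_dropWhile (p : Int → Bool) (l : List Int)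
    (hl : l.IsChain (· > ·)) : (l.dropWhile p).IsChain (· > ·) := by
  induction l with
  | nil => exact hl
  | cons a l ih =>
    by_cases hp : p a = true
    · rw [List.dropWhile_cons_of_pos hp]; exact ih hl.tail
    · rw [List.dropWhile_cons_of_neg hp]; exact hl

theorem head_dropWhile_false (p : Int → Bool) (l : List Int) (x : Int)
    (hx : (l.dropWhile p).head? = some x) : p x = false := by
  induction l with
  | nil => simp [List.dropWhile] at hx
  | cons a l ih =>
    by_cases hp : p a = true
    · rw [List.dropWhile_cons_of_pos hp] at hx; exact ih hx
    · rw [List.dropWhile_cons_of_neg hp] at hx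
      simp only [List.head?_cons, Option.some.injEq] at hx
      rw [← hx]; exact eq_false_of_ne_true hp

theorem isChain_T (r : List Int) : (T r).IsChain (· > ·) := by
  induction r with
  | nil => simp [T]
  | cons x r ih =>
    simp only [T]
    refine List.isChain_cons.mpr ⟨?_, isChain_dropWhile _ _ ih⟩
    intro y hy
    have := head_dropWhile_false (fun y => decide (x ≤ y)) (T r) y hy
    simp at this; omega

-- the key correspondence: after dropping heights > h, the stack T r has h on top
-- iff scanning r itself backwards meets h before anything < h
theorem key_iff (h : Int) (r : List Int) :
    ((T r).dropWhile (fun x => decide (h < x))).head? = some h ↔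
    (r.dropWhile (fun x => decide (h < x))).head? = some h := by
  induction r with
  | nil => simp [T]
  | cons x r ih =>
    by_cases hx : h < x
    · have hxt : (decide (h < x)) = true := by simpa using hx
      have e1 : List.dropWhile (fun x => decide (h < x)) (x :: r)
          = List.dropWhile (fun x => decide (h < x)) r := by
        simp [hxt]
      have e2 : List.dropWhile (fun y => decide (h < y)) (T (x :: r))
          = List.dropWhile (fun y => decide (h < y)) (T r) := by
        simp only [T, List.dropWhile_cons, hxt, if_true]
        exact dropWhile_dropWhile _ _ (T r) (by intro a ha; simp at ha ⊢; omega)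
      rw [e1, e2]; exact ih
    · have hxf : (decide (h < x)) = false := by simpa using hx
      simp [T, hxf]

theorem scanBack_iff (h : Int) (r : List Int) :
    scanBack h r = true ↔ ¬ (r.dropWhile (fun x => decide (h < x))).head? = some h := by
  induction r with
  | nil => simp [scanBack, List.dropWhile]
  | cons x r ih =>
    simp only [scanBack]
    by_cases he : x = h
    · subst he
      rw [List.dropWhile_cons_of_neg (by simp)]
      simp
    · by_cases hlt : x < h
      · rw [if_neg he, if_pos hlt, List.dropWhile_cons_of_neg (by simp; omega)]
        simp [he]
      · have hgt : h < x := by omega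
        rw [if_neg he, if_neg hlt, List.dropWhile_cons_of_pos (by simpa using hgt)]
        exact ih

-- if the strictly decreasing stack s has h on top, re-pushing h after dropping ≥ h gives s back
theorem cons_dropWhile_le_of_head (h : Int) (s : List Int)
    (hhd : s.head? = some h) (hch : s.IsChain (· > ·)) :
    h :: List.dropWhile (fun y => decide (h ≤ y)) s = s := by
  match s with
  | [] => simp at hhd
  | a :: s' =>
    simp only [List.head?_cons, Option.some.injEq] at hhd
    rw [hhd] at hch ⊢
    rw [List.dropWhile_cons_of_pos (by simp)]
    congr 1
    match s' with
    | [] => rfl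
    | b :: s'' =>
      have hb : h > b := (List.isChain_cons_cons.mp hch).1
      rw [List.dropWhile_cons_of_neg (by simp; omega)]

-- one step of A, on a stack of the invariant shape
theorem stepA_T (c : Int) (r : List Int) (h : Int) :
    stepA (c, T r) h = ((if scanBack h r then c + 1 else c), T (h :: r)) := by
  simp only [stepA, popA_eq_dropWhile]
  set s := (T r).dropWhile (fun x => decide (h < x)) with hs
  have hdd : s.dropWhile (fun y => decide (h ≤ y)) =
      (T r).dropWhile (fun y => decide (h ≤ y)) := by
    rw [hs, dropWhile_dropWhile _ _ (T r) (by intro a ha; simp at ha ⊢; omega)]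
  have hstack : T (h :: r) = h :: List.dropWhile (fun y => decide (h ≤ y)) s := by
    simp only [T]; rw [hdd]
  by_cases hnew : scanBack h r = true
  · -- new height: push, count
    have hhd : ¬ s.head? = some h := by
      rw [hs, key_iff]; exact (scanBack_iff h r).mp hnew
    have hsfix : List.dropWhile (fun y => decide (h ≤ y)) s = s := by
      rcases hseq : s with _ | ⟨a, s'⟩
      · rfl
      · have ha1 : decide (h < a) = false := by
          apply head_dropWhile_false (fun x => decide (h < x)) (T r)
          rw [← hs, hseq]; rfl
        have ha2 : a ≠ h := fun hc => hhd (by rw [hseq, hc]; rfl)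
        rw [List.dropWhile_cons_of_neg (by simp at ha1 ⊢; omega)]
    rw [if_pos (by
      rcases hseq : s with _ | ⟨a, s'⟩
      · exact Or.inl rfl
      · exact Or.inr (by rw [← hseq]; exact hhd))]
    simp only [hnew, if_true]
    rw [hstack, hsfix]
  · -- seen height: stack top is already h, no push, no count
    have hhd : s.head? = some h := by
      have h2 := (Iff.not (scanBack_iff h r)).mp hnew
      rw [not_not] at h2
      rw [hs, key_iff]; exact h2
    have hch : s.IsChain (· > ·) := by
      rw [hs]; exact isChain_dropWhile _ _ (isChain_T r)
    rw [if_neg (by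
      refine not_or.mpr ⟨?_, by simpa using hhd⟩
      intro hc; rw [hc] at hhd; simp at hhd)]
    have hnf : scanBack h r = false := eq_false_of_ne_true hnew
    simp only [hnf, Bool.false_eq_true, if_false]
    rw [hstack]
    exact congrArg _ (cons_dropWhile_le_of_head h s hhd hch).symm

theorem foldl_bGo (rem r : List Int) (c : Int) :
    (rem.foldl stepA (c, T r)).1 = bGo r rem c := by
  induction rem generalizing r c with
  | nil => rfl
  | cons h t ih =>
    simp only [List.foldl_cons, bGo, stepA_T]
    exact ih (h :: r) _

-- ===== VERDICT (by name: the statement is the Claim_ definition above) =====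
theorem solution_spec : Claim_equal_solution := by
  intro H _ hpre
  rcases H with _ | ⟨h0, t⟩
  · exact absurd rfl hpre
  · show solution (h0 :: t) = solution_alt (h0 :: t)
    simp only [solution, solution_alt, List.foldl_cons, bGo, scanBack, if_true]
    have h1 : stepA (1, [h0]) h0 = (1, T [h0]) := by
      simp [stepA, popA, T]
    rw [h1, foldl_bGo]
    norm_num
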